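-- pv_equiv track=rewrite | github.com/theabbie/leetcode | miscellaneous/Maximize_1_s.py | getctr
-- ===== SOURCE A (Python) =====
-- def getctr(n):
--     res = [0] * n
--     i = 0
--     j = n - 1
--     v = n
--     while i <= j:
--         if i > 0:
--             res[i] = res[i - 1] + v
--             res[j] = res[j + 1] + v
--         else:
--             res[i] = n
--             res[j] = n
--         i += 1
--         j -= 1
--         v -= 2
--     return res
-- ===== SOURCE B (Python) =====
-- def getctr(n):
--     return [(i + 1) * (n - i) for i in range(n)]
-- ===== Notes on version B (the rewrite author's own statement) =====
-- stated objective: simpler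
-- what changed: Replaces the two-pointer in-place accumulation over a mutable array by a direct closed-form per-index computation res[i] = (i+1)*(n-i).
import Mathlib
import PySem

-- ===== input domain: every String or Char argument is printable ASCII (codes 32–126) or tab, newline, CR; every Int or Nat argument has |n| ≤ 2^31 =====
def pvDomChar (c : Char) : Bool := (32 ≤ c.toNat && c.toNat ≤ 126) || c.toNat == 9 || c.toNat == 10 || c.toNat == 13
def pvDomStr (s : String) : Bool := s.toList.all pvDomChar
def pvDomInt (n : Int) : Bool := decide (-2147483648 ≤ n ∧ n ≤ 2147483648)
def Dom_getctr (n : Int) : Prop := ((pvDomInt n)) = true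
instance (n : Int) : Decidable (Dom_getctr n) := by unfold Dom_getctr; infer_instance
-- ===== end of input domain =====

-- B replaces A's two-pointer in-place accumulation by the closed form res[i] = (i+1)*(n-i) (simpler; same O(n) cost).

-- ===== PORT A =====
-- The while loop of A: state (res, i, j, v); one iteration does, for i > 0,
-- 'res[i] = res[i-1] + v' then 'res[j] = res[j+1] + v' (the second read sees the
-- first write, hence the repeated set-term), else 'res[i] = n; res[j] = n'.
-- All indices are provably nonnegative and in range whenever they are executed,
-- so '.toNat' + '.getD _ 0' is exact for Python's res[k] here.
def getctrLoop (n : Int) (res : List Int) (i j v : Int) : List Int :=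
  if _h : i ≤ j then
    getctrLoop n
      (if 0 < i then
        ((res.set i.toNat ((res.getD (i-1).toNat 0) + v)).set j.toNat
          (((res.set i.toNat ((res.getD (i-1).toNat 0) + v)).getD (j+1).toNat 0) + v))
      else ((res.set i.toNat n).set j.toNat n))
      (i+1) (j-1) (v-2)
  else res
termination_by (j - i + 1).toNat
decreasing_by omega

def getctr (n : Int) : List Int :=
  getctrLoop n (List.replicate n.toNat 0) 0 (n - 1) n

-- ===== PORT B =====
-- Source B: return [(i + 1) * (n - i) for i in range(n)]
def getctr_alt (n : Int) : List Int :=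
  (PySem.List.pyRange 0 n 1).map (fun i => (i + 1) * (n - i))

-- ===== PRECONDITION & SPEC =====
def Spec_getctr (n : Int) (out : List Int) : Prop := out = getctr_alt n
instance (n : Int) (out : List Int) : Decidable (Spec_getctr n out) := by unfold Spec_getctr; infer_instance

-- ===== CLAIM (what is proved, stated in full; the proofs are below) =====
def Claim_equal_getctr : Prop := ∀ (n : Int), Dom_getctr n → Spec_getctr n (getctr n)

-- ===== LEMMAS AND PROOFS =====

lemma getctr_alt_eq (n : Int) :
    getctr_alt n = (List.range n.toNat).map (fun p : Nat => ((p : Int) + 1) * (n - (p : Int))) := by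
  rw [getctr_alt, PySem.List.pyRange_one]
  simp [List.map_map, Function.comp]

/-- Loop invariant: if `res` already carries the closed-form value at every position
outside `[i, j]`, the loop fills in the rest and returns the closed-form list. -/
lemma getctrLoop_eq (n : Int) (m : Nat) : ∀ (i j v : Int) (res : List Int),
    (j - i + 1).toNat ≤ m →
    res.length = n.toNat → i + j = n - 1 → 0 ≤ i → v = n - 2 * i →
    (∀ (p : Nat) (hp : p < res.length), ((p : Int) < i ∨ j < (p : Int)) →
        res[p] = ((p : Int) + 1) * (n - (p : Int))) →
    getctrLoop n res i j v
      = (List.range n.toNat).map (fun p : Nat => ((p : Int) + 1) * (n - (p : Int))) := by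
  induction m with
  | zero =>
    intro i j v res hm hlen hij hi hv hinv
    have hgt : ¬ i ≤ j := by omega
    rw [getctrLoop, dif_neg hgt]
    apply List.ext_getElem (by simp [hlen])
    intro p h1 h2
    simp only [List.getElem_map, List.getElem_range]
    
    exact hinv p h1 (by omega)
  | succ m ih =>
    intro i j v res hm hlen hij hi hv hinv
    by_cases hle : i ≤ j
    · rw [getctrLoop, dif_pos hle]
      have hn1 : (1 : Int) ≤ n := by omega
      have hnn : n.toNat = n := by omega
      have hjlen : j.toNat < res.length := by omega
      have hilen : i.toNat < res.length := by omega
      apply ih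
      · omega
      · split <;> simp [hlen]
      · omega
      · omega
      · omega
      · intro p hp hcond
        by_cases hpos : 0 < i
        · simp only [if_pos hpos] at hp ⊢
          -- values read by the loop body
          have hi1len : (i - 1).toNat < res.length := by omega
          have ha : res.getD (i - 1).toNat 0 = (i - 1 + 1) * (n - (i - 1)) := by
            rw [List.getD_eq_getElem _ _ hi1len]
            have := hinv (i - 1).toNat hi1len (by omega)
            rwa [Int.toNat_of_nonneg (by omega : (0:Int) ≤ i - 1)] at this
          have hj1len : (j + 1).toNat < res.length := by omega
          have hb : res.getD (j + 1).toNat 0 = (j + 1 + 1) * (n - (j + 1)) := by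
            rw [List.getD_eq_getElem _ _ hj1len]
            have := hinv (j + 1).toNat hj1len (by omega)
            rwa [Int.toNat_of_nonneg (by omega : (0:Int) ≤ j + 1)] at this
          have hji : (j + 1).toNat ≠ i.toNat := by omega
          have hb' : (res.set i.toNat (res.getD (i-1).toNat 0 + v)).getD (j+1).toNat 0
              = (j + 1 + 1) * (n - (j + 1)) := by
            rw [List.getD_eq_getElem _ _ (by simpa using hj1len),
              List.getElem_set_ne (by omega), ← List.getD_eq_getElem _ _ hj1len, hb]
          simp only [hb']
          simp only [List.length_set] at hp
          by_cases hpj : p = j.toNat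
          · subst hpj
            rw [List.getElem_set_self (by simpa using hjlen)]
            have : ((j.toNat : Int)) = j := by omega
            have hinj : i = n - 1 - j := by omega
            rw [this, hv, hinj]; ring
          · rw [List.getElem_set_ne (by omega)]
            by_cases hpi : p = i.toNat
            · subst hpi
              rw [List.getElem_set_self (by simpa using hilen), ha]
              have : ((i.toNat : Int)) = i := by omega
              rw [this, hv]; ring
            · rw [List.getElem_set_ne (by omega)]
              exact hinv p (by simpa using hp) (by omega)
        · simp only [if_neg hpos] at hp ⊢
          have hi0 : i = 0 := by omega
          simp only [List.length_set] at hp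
          by_cases hpj : p = j.toNat
          · subst hpj
            rw [List.getElem_set_self (by simpa using hjlen)]
            have hjn : j = n - 1 := by omega
            have : ((j.toNat : Int)) = j := by omega
            rw [this, hjn]; ring
          · rw [List.getElem_set_ne (by omega)]
            by_cases hpi : p = i.toNat
            · subst hpi
              rw [List.getElem_set_self (by simpa using hilen)]
              have : ((i.toNat : Int)) = i := by omega
              rw [this, hi0]; ring
            · rw [List.getElem_set_ne (by omega)]
              exact hinv p (by simpa using hp) (by omega)
    · rw [getctrLoop, dif_neg hle]
      apply List.ext_getElem (by simp [hlen])
      intro p h1 h2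
      simp only [List.getElem_map, List.getElem_range]
    
      exact hinv p h1 (by omega)

-- ===== VERDICT (by name: the statement is the Claim_ definition above) =====
theorem getctr_spec : Claim_equal_getctr := by
  intro n _
  unfold Spec_getctr
  rw [getctr_alt_eq, getctr]
  apply getctrLoop_eq n ((n - 1 - 0 + 1).toNat)
  · omega
  · simp
  · omega
  · omega
  · omega
  · intro p hp hcond
    simp only [List.length_replicate] at hp
    omega
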